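-- pv_equiv track=rewrite | github.com/MrSnorch/Gigaverse-Bot | giga_tg_bot.py | energy_thresholds_line
-- ===== SOURCE A (Python) =====
-- def energy_thresholds_line(current: int | None, regen_per_hour: int | None) -> str:
--     """Return time until next run is possible, e.g. 'next run in 2h30m'."""
--     cur = int(current or 0)
--     rph = int(regen_per_hour or 0)
--     if rph <= 0:
--         return ""
--     next_t = next((t for t in [40, 80, 120, 160, 200, 240] if t > cur), None)
--     if next_t is None:
--         return ""
--     minutes = int(((next_t - cur) / rph) * 60)
--     if minutes < 60:
--         label = f"{minutes}m"
--     else: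
--         h, m = divmod(minutes, 60)
--         label = f"{h}h{m:02d}m" if m else f"{h}h"
--     return f"next run in {label}"
-- ===== SOURCE B (Python) =====
-- def energy_thresholds_line(current: int | None, regen_per_hour: int | None) -> str:
--     """Return time until next run is possible, e.g. 'next run in 2h30m'."""
--     cur = int(current or 0)
--     rph = int(regen_per_hour or 0)
--     if rph <= 0 or cur >= 240:
--         return ""
--     deficit = 40 - cur if cur < 40 else 40 - cur % 40
--     h, m = divmod(int((deficit / rph) * 60), 60)
--     if h == 0:
--         return f"next run in {m}m"
--     if m == 0:
--         return f"next run in {h}h"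
--     return f"next run in {h}h{m:02d}m"
-- ===== Notes on version B (the rewrite author's own statement) =====
-- stated objective: simpler
-- what changed: Replaced the linear scan over the literal threshold list [40,80,120,160,200,240] and the label-then-prefix formatting with a combined early guard (rph <= 0 or cur >= 240), a direct arithmetic deficit to the next threshold (40 - cur if cur < 40 else 40 - cur % 40) and divmod-first early-return formatting.
import Mathlib
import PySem

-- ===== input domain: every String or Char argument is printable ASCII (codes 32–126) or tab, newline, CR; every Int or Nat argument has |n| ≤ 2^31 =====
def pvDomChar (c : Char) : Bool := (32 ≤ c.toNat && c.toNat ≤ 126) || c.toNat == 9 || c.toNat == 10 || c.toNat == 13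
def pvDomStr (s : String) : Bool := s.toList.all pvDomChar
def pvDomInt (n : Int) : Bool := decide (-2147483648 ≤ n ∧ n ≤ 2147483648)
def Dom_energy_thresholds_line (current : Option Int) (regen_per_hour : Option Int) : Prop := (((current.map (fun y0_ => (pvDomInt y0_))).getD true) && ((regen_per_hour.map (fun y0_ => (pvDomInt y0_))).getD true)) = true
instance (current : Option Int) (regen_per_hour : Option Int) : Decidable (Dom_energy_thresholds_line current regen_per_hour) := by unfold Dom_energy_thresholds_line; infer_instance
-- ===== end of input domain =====

-- B replaces A's scan of the threshold list and label-then-prefix formatting with a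
-- combined early guard, a direct arithmetic deficit (40 - cur % 40), and divmod-first
-- early-return formatting (objective: simpler).

-- ---- shared hand-port of the ONE float expression both Pythons contain ----
-- Both Source A and Source B compute the identical expression `int(((x) / rph) * 60)`.
-- PySem has no floats, so this expression is ported by hand, exactly: IEEE-754 double
-- semantics (round-to-nearest-even at 53 significand bits for the division and for the
-- multiplication by 60, then truncation) emulated with integers. Exact for all
-- 1 ≤ num and 1 ≤ den that arise on Dom (no overflow/subnormals in that range).

-- round num/den to nearest integer, ties to even (num ≥ 0, den > 0)
def pvRNE (num den : Int) : Int :=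
  let q := num / den
  let r := num % den
  if 2 * r > den ∨ (2 * r = den ∧ q % 2 = 1) then q + 1 else q

-- smallest t with a·2^t ≥ b·2^52 (fuel-bounded; fuel 200 suffices on Dom)
def pvFindT (a b : Int) (t : Nat) : Nat → Nat
  | 0 => t
  | fuel + 1 => if b * 2 ^ 52 ≤ a * 2 ^ t then t else pvFindT a b (t + 1) fuel

-- exact value of Python's  int(((num / den) * 60))  with num, den positive ints
def pvFloatMinutes (num den : Int) : Int :=
  let t := pvFindT num den 0 200
  let m := pvRNE (num * 2 ^ t) den
  let mt : Int × Nat := if m = 2 ^ 53 then (2 ^ 52, t - 1) else (m, t)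
  let z := mt.1 * 60
  let s : Nat := if z < 2 ^ 58 then 5 else 6
  let m2 := pvRNE z (2 ^ s)
  let ms : Int × Nat := if m2 = 2 ^ 53 then (2 ^ 52, s + 1) else (m2, s)
  if mt.2 ≤ ms.2 then ms.1 * 2 ^ (ms.2 - mt.2) else ms.1 / 2 ^ (mt.2 - ms.2)

-- f"{m:02d}" for 0 ≤ m (both Pythons use this format spec)
def pvPad2 (m : Int) : String :=
  if m < 10 then "0" ++ PySem.Int.toStr m else PySem.Int.toStr m

-- ===== PORT A =====
def energy_thresholds_line (current : Option Int) (regen_per_hour : Option Int) : String :=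
  let cur := current.getD 0        -- int(current or 0): value-equal (None and 0 both give 0)
  let rph := regen_per_hour.getD 0
  if rph ≤ 0 then ""
  else
    match [40, 80, 120, 160, 200, 240].find? (fun t => decide (t > cur)) with
    | none => ""
    | some next_t =>
      let minutes := pvFloatMinutes (next_t - cur) rph
      let label :=
        if minutes < 60 then PySem.Int.toStr minutes ++ "m"
        else
          let h := PySem.Int.floordiv minutes 60
          let m := PySem.Int.mod minutes 60
          if m ≠ 0 then PySem.Int.toStr h ++ "h" ++ pvPad2 m ++ "m"
          else PySem.Int.toStr h ++ "h"
      "next run in " ++ label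

-- ===== PORT B =====
def energy_thresholds_line_alt (current : Option Int) (regen_per_hour : Option Int) : String :=
  let cur := current.getD 0
  let rph := regen_per_hour.getD 0
  if rph ≤ 0 ∨ 240 ≤ cur then ""
  else
    let deficit := if cur < 40 then 40 - cur else 40 - PySem.Int.mod cur 40
    let h := PySem.Int.floordiv (pvFloatMinutes deficit rph) 60
    let m := PySem.Int.mod (pvFloatMinutes deficit rph) 60
    if h = 0 then "next run in " ++ PySem.Int.toStr m ++ "m"
    else if m = 0 then "next run in " ++ PySem.Int.toStr h ++ "h"
    else "next run in " ++ PySem.Int.toStr h ++ "h" ++ pvPad2 m ++ "m"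

-- ===== PRECONDITION & SPEC =====
def Spec_energy_thresholds_line (current : Option Int) (regen_per_hour : Option Int) (out : String) : Prop := out = energy_thresholds_line_alt current regen_per_hour
instance (current : Option Int) (regen_per_hour : Option Int) (out : String) : Decidable (Spec_energy_thresholds_line current regen_per_hour out) := by unfold Spec_energy_thresholds_line; infer_instance

-- ===== CLAIM (what is proved, stated in full; the proofs are below) =====
def Claim_equal_energy_thresholds_line : Prop := ∀ (current : Option Int) (regen_per_hour : Option Int), Dom_energy_thresholds_line current regen_per_hour → Spec_energy_thresholds_line current regen_per_hour (energy_thresholds_line current regen_per_hour)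

-- ===== LEMMAS AND PROOFS =====

theorem pvRNE_nonneg (num den : Int) (h : 0 ≤ num) (hd : 0 < den) : 0 ≤ pvRNE num den := by
  have hq : 0 ≤ num / den := Int.ediv_nonneg h hd.le
  have e : pvRNE num den =
      if 2 * (num % den) > den ∨ (2 * (num % den) = den ∧ num / den % 2 = 1)
      then num / den + 1 else num / den := rfl
  rw [e]; split_ifs <;> omega

theorem pvFloatMinutes_nonneg (num den : Int) (h : 0 ≤ num) (hd : 0 < den) :
    0 ≤ pvFloatMinutes num den := by
  unfold pvFloatMinutes
  have h1 : 0 ≤ pvRNE (num * 2 ^ pvFindT num den 0 200) den :=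
    pvRNE_nonneg _ _ (by positivity) hd
  have key : ∀ (x : Int) (s : Nat), 0 ≤ x → 0 ≤ pvRNE (x * 60) (2 ^ s) := by
    intro x s hx
    exact pvRNE_nonneg _ _ (mul_nonneg hx (by norm_num)) (by positivity)
  dsimp only
  split_ifs
  all_goals dsimp only
  all_goals
    first
      | exact mul_nonneg (by positivity) (by positivity)
      | exact mul_nonneg (key _ _ (by positivity)) (by positivity)
      | exact mul_nonneg (key _ _ h1) (by positivity)
      | exact Int.ediv_nonneg (by positivity) (by positivity)
      | exact Int.ediv_nonneg (key _ _ (by positivity)) (by positivity)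

-- A's first-match scan over [40,80,120,160,200,240] characterised arithmetically:
-- none iff cur ≥ 240, otherwise cur + deficit with B's deficit formula.
theorem scan_eq (cur : Int) :
    [(40 : Int), 80, 120, 160, 200, 240].find? (fun t => decide (t > cur)) =
      (if 240 ≤ cur then none
       else some (cur + (if cur < 40 then 40 - cur else 40 - PySem.Int.mod cur 40))) := by
  have h1 : PySem.Int.floordiv cur 40 * 40 + PySem.Int.mod cur 40 = cur :=
    PySem.Int.floordiv_mul_add_mod cur 40
  have h2 : 0 ≤ PySem.Int.mod cur 40 := PySem.Int.mod_nonneg cur (by norm_num)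
  have h3 : PySem.Int.mod cur 40 < 40 := PySem.Int.mod_lt cur (by norm_num)
  set q := PySem.Int.floordiv cur 40 with hq
  set r := PySem.Int.mod cur 40 with hr
  simp only [List.find?, gt_iff_lt]
  split_ifs with h c1 c1
  · simp [show ¬ cur < 40 by omega, show ¬ cur < 80 by omega, show ¬ cur < 120 by omega,
      show ¬ cur < 160 by omega, show ¬ cur < 200 by omega, show ¬ cur < 240 by omega]
  · simp [c1]
  · by_cases c2 : cur < 80
    · simp [c1, c2, Option.some.injEq]; omega
    · by_cases c3 : cur < 120
      · simp [c1, c2, c3, Option.some.injEq]; omega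
      · by_cases c4 : cur < 160
        · simp [c1, c2, c3, c4, Option.some.injEq]; omega
        · by_cases c5 : cur < 200
          · simp [c1, c2, c3, c4, c5, Option.some.injEq]; omega
          · simp [c1, c2, c3, c4, c5, show cur < 240 by omega, Option.some.injEq]; omega

theorem energy_thresholds_line_spec' (current regen_per_hour : Option Int) :
    energy_thresholds_line current regen_per_hour =
      energy_thresholds_line_alt current regen_per_hour := by
  simp only [energy_thresholds_line, energy_thresholds_line_alt, scan_eq]
  set cur := current.getD 0 with hcur
  set rph := regen_per_hour.getD 0 with hrph
  by_cases hr : rph ≤ 0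
  · simp [hr]
  · by_cases hc : (240 : Int) ≤ cur
    · simp [hr, hc]
    · simp only [hr, hc, if_false]
      set d := if cur < 40 then (40 : Int) - cur else 40 - PySem.Int.mod cur 40 with hd
      have hdc : cur + d - cur = d := by ring
      rw [hdc]
      have hd1 : 1 ≤ d := by
        have h2 : 0 ≤ PySem.Int.mod cur 40 := PySem.Int.mod_nonneg cur (by norm_num)
        have h3 : PySem.Int.mod cur 40 < 40 := PySem.Int.mod_lt cur (by norm_num)
        rw [hd]; split_ifs <;> omega
      set minutes := pvFloatMinutes d rph with hm
      have hmn : 0 ≤ minutes := pvFloatMinutes_nonneg d rph (by omega) (by omega)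
      have hq60 : PySem.Int.floordiv minutes 60 * 60 + PySem.Int.mod minutes 60 = minutes :=
        PySem.Int.floordiv_mul_add_mod minutes 60
      have hr0 : 0 ≤ PySem.Int.mod minutes 60 := PySem.Int.mod_nonneg minutes (by norm_num)
      have hr60 : PySem.Int.mod minutes 60 < 60 := PySem.Int.mod_lt minutes (by norm_num)
      set q := PySem.Int.floordiv minutes 60 with hqd
      set m := PySem.Int.mod minutes 60 with hmd
      by_cases hlt : minutes < 60
      · have hq0 : q = 0 := by omega
        have hmm : m = minutes := by omega
        simp [hlt, hq0, hmm, String.append_assoc]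
      · have hq0 : q ≠ 0 := by omega
        by_cases hm0 : m = 0
        · simp [hlt, hq0, hm0, String.append_assoc]
        · simp [hlt, hq0, hm0, String.append_assoc]

-- ===== VERDICT (by name: the statement is the Claim_ definition above) =====
theorem energy_thresholds_line_spec : Claim_equal_energy_thresholds_line := by
  intro current regen_per_hour _
  exact energy_thresholds_line_spec' current regen_per_hour
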